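-- pv_equiv track=rewrite | github.com/owl-birds/pythonNUB | Methods/Functions/function1.py | evOdUpLow
-- ===== SOURCE A (Python) =====
-- def evOdUpLow(aString):
--     temp = ""
--     count = 1
--     for i in aString.lower():
--         if count % 2 == 0:
--             temp += i.upper()
--             count += 1
--         else:
--             temp += i
--             count += 1
--     return temp
-- ===== SOURCE B (Python) =====
-- def evOdUpLow(aString):
--     chars = list(aString.lower())
--     for i in range(1, len(chars), 2):
--         chars[i] = chars[i].upper()
--     return ''.join(chars)
-- ===== Notes on version B (the rewrite author's own statement) =====
-- stated objective: alternative
-- what changed: B lowercases the whole string once into a mutable character list and uppercases only the odd positions in a second strided pass (range(1, len, 2)), instead of A's single loop that branches per character on a running 1-based counter and builds the result by string concatenation.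
import Mathlib
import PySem

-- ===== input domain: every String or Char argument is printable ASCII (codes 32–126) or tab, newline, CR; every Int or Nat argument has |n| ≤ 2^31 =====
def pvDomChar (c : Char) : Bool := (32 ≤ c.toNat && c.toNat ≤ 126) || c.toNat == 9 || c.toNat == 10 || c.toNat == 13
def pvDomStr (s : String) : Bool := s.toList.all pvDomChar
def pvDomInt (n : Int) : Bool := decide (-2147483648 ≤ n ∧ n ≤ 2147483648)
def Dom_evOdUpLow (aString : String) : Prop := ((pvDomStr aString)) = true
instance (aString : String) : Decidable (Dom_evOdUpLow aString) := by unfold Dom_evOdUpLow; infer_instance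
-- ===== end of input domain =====

-- B lowercases once into a character list and uppercases only the odd positions in a
-- strided second pass, instead of A's per-character parity branch with a running counter
-- (objective: alternative decomposition, same cost).

-- ===== PORT A =====
-- the for-loop of A, carrying (temp, count); 'i.upper()' on the one-char string i is Chars.upper [c]
def evOdUpLowLoop : List Char → List Char → Int → List Char
  | [], temp, _ => temp
  | c :: rest, temp, count =>
      if PySem.Int.mod count 2 == 0 then
        evOdUpLowLoop rest (temp ++ PySem.Chars.upper [c]) (count + 1)
      else
        evOdUpLowLoop rest (temp ++ [c]) (count + 1)

def evOdUpLow (aString : String) : String :=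
  String.ofList (evOdUpLowLoop (PySem.Str.lower aString).toList [] 1)

-- ===== PORT B =====
-- chars[i] = chars[i].upper() for i in range(1, len(chars), 2); every index the range
-- produces satisfies 1 ≤ i < len, so List.getD/List.set on i.toNat are exact here
def pvUpd (cs : List Char) (i : Int) : List Char :=
  cs.set i.toNat (PySem.Chars.upperChar (cs.getD i.toNat ' '))

def evOdUpLow_alt (aString : String) : String :=
  let chars := PySem.Chars.lower aString.toList
  let chars := (PySem.List.pyRange 1 (chars.length : Int) 2).foldl pvUpd chars
  String.ofList chars

-- ===== PRECONDITION & SPEC =====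
def Spec_evOdUpLow (aString : String) (out : String) : Prop := out = evOdUpLow_alt aString
instance (aString : String) (out : String) : Decidable (Spec_evOdUpLow aString out) := by unfold Spec_evOdUpLow; infer_instance

-- ===== CLAIM (what is proved, stated in full; the proofs are below) =====
def Claim_equal_evOdUpLow : Prop := ∀ (aString : String), Dom_evOdUpLow aString → Spec_evOdUpLow aString (evOdUpLow aString)

-- ===== LEMMAS AND PROOFS =====

-- common reference shape: A's loop body as a structural recursion producing the output list
def pvMark : List Char → Int → List Char
  | [], _ => []
  | c :: rest, n =>
      (if PySem.Int.mod n 2 == 0 then PySem.Chars.upper [c] else [c]) ++ pvMark rest (n + 1)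

theorem evOdUpLowLoop_eq (cs : List Char) : ∀ (temp : List Char) (n : Int),
    evOdUpLowLoop cs temp n = temp ++ pvMark cs n := by
  induction cs with
  | nil => intro temp n; simp [evOdUpLowLoop, pvMark]
  | cons c rest ih =>
    intro temp n
    simp [evOdUpLowLoop, pvMark, ih, List.append_assoc]
    split <;> simp

theorem pvMark_add_two (cs : List Char) : ∀ n : Int, pvMark cs (n + 2) = pvMark cs n := by
  induction cs with
  | nil => intro n; simp [pvMark]
  | cons c rest ih =>
    intro n
    have hm : PySem.Int.mod (n + 2) 2 = PySem.Int.mod n 2 := by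
      rw [PySem.Int.mod_eq_emod_of_pos (by norm_num), PySem.Int.mod_eq_emod_of_pos (by norm_num)]
      omega
    have : n + 2 + 1 = n + 1 + 2 := by ring
    simp [pvMark, this, ih]

theorem pyRange_two_nil {a b : Int} (h : b ≤ a) : PySem.List.pyRange a b 2 = [] := by
  rw [PySem.List.pyRange_of_pos _ _ (by norm_num : (0:Int) < 2)]
  simp [if_neg (not_lt.mpr h)]

theorem pyRange_two_cons {a b : Int} (h : a < b) :
    PySem.List.pyRange a b 2 = a :: PySem.List.pyRange (a + 2) b 2 := by
  rw [PySem.List.pyRange_of_pos _ _ (by norm_num : (0:Int) < 2),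
      PySem.List.pyRange_of_pos _ _ (by norm_num : (0:Int) < 2)]
  rw [if_pos h]
  have hn : ((b - a + 2 - 1) / 2).toNat
      = (if a + 2 < b then ((b - (a + 2) + 2 - 1) / 2).toNat else 0) + 1 := by
    split_ifs with h2 <;> omega
  rw [hn, List.range_succ_eq_map]
  simp [List.map_map, Function.comp]
  intro k _
  ring

theorem pyRange_two_shift (b : Int) :
    (PySem.List.pyRange 3 b 2).map (· - 2) = PySem.List.pyRange 1 (b - 2) 2 := by
  rw [PySem.List.pyRange_of_pos _ _ (by norm_num : (0:Int) < 2),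
      PySem.List.pyRange_of_pos _ _ (by norm_num : (0:Int) < 2), List.map_map]
  have hc : (3 < b) ↔ (1 < b - 2) := by omega
  have he : (b - 3 + 2 - 1) = (b - 2 - 1 + 2 - 1) := by ring
  rw [he, if_congr hc rfl rfl]
  apply List.map_congr_left; intro k _
  simp [Function.comp]; ring

theorem foldl_pvUpd_shift (l : List Int) (hl : ∀ i ∈ l, 2 ≤ i) (x y : Char) :
    ∀ cs : List Char, l.foldl pvUpd (x :: y :: cs) = x :: y :: (l.map (· - 2)).foldl pvUpd cs := by
  induction l with
  | nil => intro cs; simp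
  | cons i l ih =>
    intro cs
    have hi : 2 ≤ i := hl i (by simp)
    have h2 : i.toNat = (i - 2).toNat + 2 := by omega
    have hstep : pvUpd (x :: y :: cs) i = x :: y :: pvUpd cs (i - 2) := by
      simp [pvUpd, h2]
    simp only [List.foldl_cons, List.map_cons, hstep]
    exact ih (fun j hj => hl j (by simp [hj])) (pvUpd cs (i - 2))

theorem pvMark_two_step (c1 c2 : Char) (r : List Char) :
    pvMark (c1 :: c2 :: r) 1 = c1 :: PySem.Chars.upperChar c2 :: pvMark r 1 := by
  simp [pvMark, PySem.Int.mod, PySem.Chars.upper]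
  rw [show (3:Int) = 1 + 2 from by norm_num, pvMark_add_two]

theorem foldl_range_eq_pvMark : ∀ cs : List Char,
    (PySem.List.pyRange 1 (cs.length : Int) 2).foldl pvUpd cs = pvMark cs 1
  | [] => by simp [pyRange_two_nil, pvMark]
  | [c] => by
      simp [pyRange_two_nil, pvMark, PySem.Int.mod]
  | c1 :: c2 :: r => by
      have hlen : ((c1 :: c2 :: r).length : Int) = (r.length : Int) + 2 := by
        simp; ring
      rw [hlen, pyRange_two_cons (by omega)]
      have hstep : pvUpd (c1 :: c2 :: r) 1 = c1 :: PySem.Chars.upperChar c2 :: r := by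
        simp [pvUpd]
      simp only [List.foldl_cons, hstep]
      rw [foldl_pvUpd_shift _ (fun i hi => by
            rcases (PySem.List.mem_pyRange_iff_of_pos (by norm_num : (0:Int) < 2) i).mp hi
              with ⟨h1, _, _⟩
            omega)]
      rw [show (1:Int) + 2 = 3 from by norm_num, pyRange_two_shift]
      have : (r.length : Int) + 2 - 2 = (r.length : Int) := by ring
      rw [this, foldl_range_eq_pvMark r, pvMark_two_step]

-- ===== VERDICT (by name: the statement is the Claim_ definition above) =====
theorem evOdUpLow_spec : Claim_equal_evOdUpLow := by
  intro s _
  unfold Spec_evOdUpLow evOdUpLow evOdUpLow_alt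
  simp only [PySem.Str.toList_lower]
  rw [evOdUpLowLoop_eq, foldl_range_eq_pvMark]
  simp
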